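-- pv_equiv track=rewrite | github.com/tatoslover/data601 | COSC480/Assignment2.py | regions_from_sites
-- ===== SOURCE A (Python) =====
-- from typing import Dict, List, Tuple, Optional
--
-- def regions_from_sites(sites_info: Dict[int, Tuple[str, str]]) -> Dict[str, List[int]]:
--     """ Takes a sites_info dictionary and returns a dictionary where the keys
--         are region names and the values are lists of site_ids in those regions
--
--     Args:
--         sites_info: Dictionary mapping site_ids to (site_name, region) tuples
--
--     Returns:
--         Dictionary mapping region names to lists of site_ids
--     """
--     result = dict()
--     for site_id, (name, region) in sites_info.items():
--         if region not in result:
--             result[region] = [site_id]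
--         else:
--             result[region] = result[region] + [site_id]
--     return result
-- ===== SOURCE B (Python) =====
-- def regions_from_sites(sites_info):
--     """Sort-based grouping: record first-seen region order, sort the items by
--     region (stable, so within a region site_ids keep dict order), sweep the
--     sorted list once collecting each maximal run of equal regions, then emit
--     the groups in first-seen region order."""
--     order = dict.fromkeys(region for _, region in sites_info.values())
--     items = sorted(sites_info.items(), key=lambda kv: kv[1][1])
--     grouped = {}
--     i = 0
--     n = len(items)
--     while i < n:
--         r = items[i][1][1]
--         ids = []
--         while i < n and items[i][1][1] == r:
--             ids.append(items[i][0])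
--             i += 1
--         grouped[r] = ids
--     return {r: grouped[r] for r in order}
-- ===== Notes on version B (the rewrite author's own statement) =====
-- stated objective: alternative
-- what changed: Replaces A's single pass that incrementally grows a dict by concatenation with a sort-based grouping: stable-sort the items by region, sweep the sorted list once collecting maximal runs of equal regions, then emit the groups in first-seen region order; it trades the incremental dict for a sort plus a run sweep.
import Mathlib
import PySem

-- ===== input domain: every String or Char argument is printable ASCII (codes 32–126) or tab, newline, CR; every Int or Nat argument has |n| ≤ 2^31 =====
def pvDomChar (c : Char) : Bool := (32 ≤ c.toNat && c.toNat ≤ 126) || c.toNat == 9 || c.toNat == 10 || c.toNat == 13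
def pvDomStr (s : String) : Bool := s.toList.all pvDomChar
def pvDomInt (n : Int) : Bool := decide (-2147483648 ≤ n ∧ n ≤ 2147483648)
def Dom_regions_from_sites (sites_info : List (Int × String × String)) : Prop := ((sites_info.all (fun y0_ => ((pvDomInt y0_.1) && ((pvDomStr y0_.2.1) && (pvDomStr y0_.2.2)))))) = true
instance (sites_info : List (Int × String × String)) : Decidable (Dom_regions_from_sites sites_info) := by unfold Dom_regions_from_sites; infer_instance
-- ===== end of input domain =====

-- B replaces A's incremental dict pass by stable sort on region + a run sweep, emitted in first-seen region order (alternative algorithm, same results).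

-- ===== PORT A =====
-- literal port of A's loop: a dict built one element at a time, rebuilding the region's list by concatenation
def regions_from_sites (sites_info : List (Int × String × String)) : List (String × List Int) :=
  (sites_info.foldl
    (fun result p =>
      let site_id := p.1
      let region := p.2.2
      if ¬ result.contains region then
        result.insert region [site_id]
      else
        result.insert region (result.getD region [] ++ [site_id]))
    (PySem.Dict.empty : PySem.Dict String (List Int))).items

-- ===== PORT B =====
-- the while-loop sweep of Source B: each outer iteration consumes one maximal run
-- of equal regions (the inner while = takeWhile/dropWhile on the run predicate)
-- and stores grouped[r] = ids of the run.
def rfsGroup : List (Int × String × String) → PySem.Dict String (List Int) → PySem.Dict String (List Int)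
  | [], grouped => grouped
  | p :: t, grouped =>
    let r := p.2.2
    let run := (p :: t).takeWhile (fun q => q.2.2 == r)
    let rest := (p :: t).dropWhile (fun q => q.2.2 == r)
    rfsGroup rest (grouped.insert r (run.map (fun q => q.1)))
  termination_by xs _ => xs.length
  decreasing_by
    simp only [List.dropWhile_cons, show (p.2.2 == p.2.2) = true by simp]
    exact Nat.lt_succ_of_le (t.dropWhile_sublist _).length_le

-- literal port of Source B: first-seen region order (dict.fromkeys = PySem.Set.ofList),
-- stable sort by region, run sweep, then the final comprehension over the order.
-- Python's grouped[r] always finds the key (every region of `order` occurs in `items`),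
-- so it is exactly getD with an unused default.
def regions_from_sites_alt (sites_info : List (Int × String × String)) : List (String × List Int) :=
  let order := PySem.Set.ofList (sites_info.map (fun p => p.2.2))
  let items := PySem.List.sorted sites_info (fun p => p.2.2)
  let grouped := rfsGroup items PySem.Dict.empty
  order.map (fun r => (r, grouped.getD r []))

-- ===== PRECONDITION & SPEC =====
def Spec_regions_from_sites (sites_info : List (Int × String × String)) (out : List (String × List Int)) : Prop := out = regions_from_sites_alt sites_info
instance (sites_info : List (Int × String × String)) (out : List (String × List Int)) : Decidable (Spec_regions_from_sites sites_info out) := by unfold Spec_regions_from_sites; infer_instance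

-- ===== CLAIM (what is proved, stated in full; the proofs are below) =====
def Claim_equal_regions_from_sites : Prop := ∀ (sites_info : List (Int × String × String)), Dom_regions_from_sites sites_info → Spec_regions_from_sites sites_info (regions_from_sites sites_info)

-- ===== LEMMAS AND PROOFS =====

-- ----- A side: A's dict, looked up at a region, is the filter of the input -----

def rfsStep (d : PySem.Dict String (List Int)) (p : Int × String × String) : PySem.Dict String (List Int) :=
  if ¬ d.contains p.2.2 then d.insert p.2.2 [p.1]
  else d.insert p.2.2 (d.getD p.2.2 [] ++ [p.1])

def rfsVal (d : PySem.Dict String (List Int)) (p : Int × String × String) : List Int :=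
  if ¬ d.contains p.2.2 then [p.1] else d.getD p.2.2 [] ++ [p.1]

theorem rfsStep_getD (d : PySem.Dict String (List Int)) (p : Int × String × String) (c : String) :
    (rfsStep d p).getD c [] = if c = p.2.2 then d.getD c [] ++ [p.1] else d.getD c [] := by
  unfold rfsStep
  by_cases h : d.contains p.2.2
  · rw [if_neg (by simp [h]), PySem.Dict.getD_insert]
    by_cases hc : c = p.2.2 <;> simp [hc]
  · rw [if_pos (by simp [h]), PySem.Dict.getD_insert]
    by_cases hc : c = p.2.2
    · subst hc
      rw [if_pos rfl, PySem.Dict.getD_of_not_contains d [] (by simpa using h)]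
      simp
    · simp [hc]

theorem rfsFold_getD (l : List (Int × String × String)) (d : PySem.Dict String (List Int)) (c : String) :
    (l.foldl rfsStep d).getD c [] = d.getD c [] ++ ((l.filter (fun p => p.2.2 == c)).map (fun p => p.1)) := by
  induction l generalizing d with
  | nil => simp
  | cons p t ih =>
    simp only [List.foldl_cons, ih, rfsStep_getD, List.filter_cons]
    by_cases h : c = p.2.2
    · simp [h]
    · have h' : ¬ p.2.2 = c := fun hne => h hne.symm
      simp [h, h']

theorem rfsFold_keys (l : List (Int × String × String)) :
    (l.foldl rfsStep PySem.Dict.empty).keys = PySem.Set.ofList (l.map (fun p => p.2.2)) := by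
  have h : l.foldl rfsStep PySem.Dict.empty
      = l.foldl (fun d p => d.insert p.2.2 (rfsVal d p)) PySem.Dict.empty := by
    apply PySem.List.foldl_congr_mem
    intro d p _
    unfold rfsStep rfsVal
    by_cases hc : d.contains p.2.2 <;> simp [hc]
  rw [h, PySem.Dict.keys_foldl_insert_key]
  simp [PySem.Set.update, PySem.Set.ofList_eq_foldl]

theorem rfsFold_nodup_keys (l : List (Int × String × String)) :
    (l.foldl rfsStep PySem.Dict.empty).keys.Nodup := by
  rw [rfsFold_keys]
  exact PySem.Set.nodup_ofList _

-- ----- B side, stability: filtering one region commutes with the stable sort -----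

theorem rfs_filter_insertBy (x : Int × String × String) (acc : List (Int × String × String)) (r : String)
    (hs : acc.Pairwise (fun a b => a.2.2 ≤ b.2.2)) :
    (PySem.List.insertBy (fun a b => decide (a.2.2 < b.2.2)) x acc).filter (fun q => q.2.2 == r)
      = acc.filter (fun q => q.2.2 == r) ++ (if x.2.2 == r then [x] else []) := by
  induction acc with
  | nil =>
    simp only [PySem.List.insertBy, List.filter_cons, List.filter_nil]
    by_cases hx : x.2.2 = r <;> simp [hx]
  | cons y ys ih =>
    rw [List.pairwise_cons] at hs
    simp only [PySem.List.insertBy]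
    by_cases hlt : x.2.2 < y.2.2
    · rw [if_pos (by simpa using hlt)]
      by_cases hxr : x.2.2 = r
      · have hnone : (y :: ys).filter (fun q => q.2.2 == r) = [] := by
          rw [List.filter_eq_nil_iff]
          intro z hz
          have hz' : y.2.2 ≤ z.2.2 := by
            rcases List.mem_cons.mp hz with h | h
            · simp [h]
            · exact hs.1 z h
          have : x.2.2 < z.2.2 := lt_of_lt_of_le hlt hz'
          simp only [beq_iff_eq]
          intro hzr
          exact absurd (hzr.trans hxr.symm) (ne_of_gt this)
        simp [hxr, hnone]
      · have hxr' : (x.2.2 == r) = false := by simpa using hxr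
        simp [hxr']
    · rw [if_neg (by simpa using hlt)]
      rw [List.filter_cons, List.filter_cons, ih hs.2]
      by_cases hy : y.2.2 = r <;> simp [hy]

theorem rfs_pairwise_insertBy (x : Int × String × String) (acc : List (Int × String × String))
    (hs : acc.Pairwise (fun a b => a.2.2 ≤ b.2.2)) :
    (PySem.List.insertBy (fun a b => decide (a.2.2 < b.2.2)) x acc).Pairwise (fun a b => a.2.2 ≤ b.2.2) := by
  induction acc with
  | nil => simp [PySem.List.insertBy]
  | cons y ys ih =>
    rw [List.pairwise_cons] at hs
    simp only [PySem.List.insertBy]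
    by_cases hlt : x.2.2 < y.2.2
    · rw [if_pos (by simpa using hlt)]
      refine List.pairwise_cons.mpr ⟨?_, List.pairwise_cons.mpr hs⟩
      intro z hz
      rcases List.mem_cons.mp hz with h | h
      · exact le_of_lt (h ▸ hlt)
      · exact le_of_lt (lt_of_lt_of_le hlt (hs.1 z h))
    · rw [if_neg (by simpa using hlt)]
      refine List.pairwise_cons.mpr ⟨?_, ih hs.2⟩
      intro z hz
      rcases (PySem.List.mem_insertBy _ _ _ _).mp hz with h | h
      · exact h ▸ le_of_not_gt hlt
      · exact hs.1 z h
 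
theorem rfs_filter_sorted (l : List (Int × String × String)) (r : String) :
    (PySem.List.sorted l (fun p => p.2.2)).filter (fun q => q.2.2 == r)
      = l.filter (fun q => q.2.2 == r) := by
  rw [PySem.List.sorted_eq_foldl_insertBy]
  suffices h : ∀ acc : List (Int × String × String), acc.Pairwise (fun a b => a.2.2 ≤ b.2.2) →
      (l.foldl (fun acc x => PySem.List.insertBy (fun a b => decide (a.2.2 < b.2.2)) x acc) acc).filter (fun q => q.2.2 == r)
        = acc.filter (fun q => q.2.2 == r) ++ l.filter (fun q => q.2.2 == r) by
    simpa using h [] (by simp)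
  induction l with
  | nil => intro acc _; simp
  | cons x t ih =>
    intro acc hacc
    rw [List.foldl_cons, ih _ (rfs_pairwise_insertBy x acc hacc), rfs_filter_insertBy x acc r hacc]
    rw [List.filter_cons]
    by_cases hx : x.2.2 = r <;> simp [hx]

-- ----- B side, the run sweep on a key-sorted list -----

theorem rfs_pred_head_dropWhile {α : Type} (l : List α) (p : α → Bool) (h : α) (t' : List α)
    (hd : l.dropWhile p = h :: t') : p h = false := by
  induction l with
  | nil => simp at hd
  | cons a t ih =>
    rw [List.dropWhile_cons] at hd
    by_cases hp : p a
    · rw [if_pos hp] at hd; exact ih hd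
    · rw [if_neg hp] at hd
      cases hd; simpa using hp

theorem rfs_dropWhile_no_match (xs : List (Int × String × String)) (p : Int × String × String)
    (hs : (p :: xs).Pairwise (fun a b : Int × String × String => a.2.2 ≤ b.2.2)) :
    ∀ z ∈ (p :: xs).dropWhile (fun q => q.2.2 == p.2.2), ¬ (z.2.2 == p.2.2) = true := by
  have hmin : ∀ z ∈ (p :: xs), p.2.2 ≤ z.2.2 := by
    intro z hz
    rcases List.mem_cons.mp hz with h | h
    · simp [h]
    · exact (List.pairwise_cons.mp hs).1 z h
  cases hd : (p :: xs).dropWhile (fun q => q.2.2 == p.2.2) with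
  | nil => simp
  | cons h t =>
    have hhead : ¬ (h.2.2 == p.2.2) = true := by
      simpa using rfs_pred_head_dropWhile (p :: xs) (fun q => q.2.2 == p.2.2) h t hd
    have hple : p.2.2 ≤ h.2.2 := hmin h ((List.dropWhile_sublist _).mem (by rw [hd]; simp))
    have hplt : p.2.2 < h.2.2 := by
      simp only [beq_iff_eq] at hhead
      exact lt_of_le_of_ne hple (fun he => hhead he.symm)
    have hpair : (h :: t).Pairwise (fun a b : Int × String × String => a.2.2 ≤ b.2.2) :=
      hd ▸ hs.sublist (List.dropWhile_sublist _)
    intro z hz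
    have hhz : h.2.2 ≤ z.2.2 := by
      rcases List.mem_cons.mp hz with h' | h'
      · simp [h']
      · exact (List.pairwise_cons.mp hpair).1 z h'
    simp only [beq_iff_eq]
    exact fun hzr => absurd (hzr ▸ lt_of_lt_of_le hplt hhz) (lt_irrefl _)

theorem rfs_filter_eq_takeWhile (xs : List (Int × String × String)) (p : Int × String × String)
    (hs : (p :: xs).Pairwise (fun a b : Int × String × String => a.2.2 ≤ b.2.2)) :
    (p :: xs).filter (fun q => q.2.2 == p.2.2) = (p :: xs).takeWhile (fun q => q.2.2 == p.2.2) := by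
  have hdecomp := List.takeWhile_append_dropWhile (p := fun q : Int × String × String => q.2.2 == p.2.2) (l := p :: xs)
  have hdrop : ((p :: xs).dropWhile (fun q => q.2.2 == p.2.2)).filter (fun q => q.2.2 == p.2.2) = [] := by
    rw [List.filter_eq_nil_iff]
    exact rfs_dropWhile_no_match xs p hs
  calc (p :: xs).filter (fun q => q.2.2 == p.2.2)
      = (((p :: xs).takeWhile (fun q => q.2.2 == p.2.2)) ++ ((p :: xs).dropWhile (fun q => q.2.2 == p.2.2))).filter (fun q => q.2.2 == p.2.2) := by rw [hdecomp]
    _ = (p :: xs).takeWhile (fun q => q.2.2 == p.2.2) := by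
        rw [List.filter_append, hdrop, List.append_nil]
        exact List.filter_eq_self.mpr
          (fun z hz => List.mem_takeWhile_imp (p := fun q : Int × String × String => q.2.2 == p.2.2) hz)

theorem rfsGroup_getD_aux (n : Nat) : ∀ (xs : List (Int × String × String)), xs.length ≤ n →
    ∀ (d : PySem.Dict String (List Int)) (r : String),
    xs.Pairwise (fun a b : Int × String × String => a.2.2 ≤ b.2.2) →
    (rfsGroup xs d).getD r []
      = if r ∈ xs.map (fun p => p.2.2) then (xs.filter (fun q => q.2.2 == r)).map (fun q => q.1)
        else d.getD r [] := by
  induction n with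
  | zero =>
    intro xs hlen d r _
    have : xs = [] := List.eq_nil_of_length_eq_zero (Nat.le_zero.mp hlen)
    subst this
    simp [rfsGroup]
  | succ n ih =>
    intro xs hlen d r hs
    cases xs with
    | nil => simp [rfsGroup]
    | cons p t =>
      have hstep : rfsGroup (p :: t) d
          = rfsGroup ((p :: t).dropWhile (fun q => q.2.2 == p.2.2))
              (d.insert p.2.2 (((p :: t).takeWhile (fun q => q.2.2 == p.2.2)).map (fun q => q.1))) := by
        rw [rfsGroup]
      have hdroplen : ((p :: t).dropWhile (fun q => q.2.2 == p.2.2)).length ≤ n := by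
        have h1 : (p :: t).dropWhile (fun q => q.2.2 == p.2.2) = t.dropWhile (fun q => q.2.2 == p.2.2) := by
          rw [List.dropWhile_cons, if_pos (by simp)]
        rw [h1]
        have h2 := (t.dropWhile_sublist (fun q => q.2.2 == p.2.2)).length_le
        have hlen' : t.length + 1 ≤ n + 1 := by simpa using hlen
        omega
      have hpairrest : ((p :: t).dropWhile (fun q => q.2.2 == p.2.2)).Pairwise (fun a b : Int × String × String => a.2.2 ≤ b.2.2) :=
        hs.sublist (List.dropWhile_sublist _)
      have hnomatch := rfs_dropWhile_no_match t p hs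
      have hnotmem : p.2.2 ∉ ((p :: t).dropWhile (fun q => q.2.2 == p.2.2)).map (fun q => q.2.2) := by
        intro hmem
        rcases List.mem_map.mp hmem with ⟨z, hz, hzr⟩
        exact hnomatch z hz (by simp [hzr])
      rw [hstep, ih _ hdroplen _ _ hpairrest]
      by_cases hr : r = p.2.2
      · subst hr
        rw [if_neg hnotmem, if_pos (by simp), PySem.Dict.getD_insert, if_pos rfl,
          rfs_filter_eq_takeWhile t p hs]
      · have hsplit : (p :: t).filter (fun q => q.2.2 == r)
            = ((p :: t).dropWhile (fun q => q.2.2 == p.2.2)).filter (fun q => q.2.2 == r) := by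
          conv_lhs => rw [← List.takeWhile_append_dropWhile (p := fun q : Int × String × String => q.2.2 == p.2.2) (l := p :: t)]
          rw [List.filter_append]
          have htake : ((p :: t).takeWhile (fun q => q.2.2 == p.2.2)).filter (fun q => q.2.2 == r) = [] := by
            rw [List.filter_eq_nil_iff]
            intro z hz
            have := List.mem_takeWhile_imp (p := fun q : Int × String × String => q.2.2 == p.2.2) hz
            simp only [beq_iff_eq] at this ⊢
            exact fun hzr => hr (hzr ▸ this ▸ rfl)
          rw [htake, List.nil_append]
        by_cases hrrest : r ∈ ((p :: t).dropWhile (fun q => q.2.2 == p.2.2)).map (fun q => q.2.2)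
        · rw [if_pos hrrest, if_pos, hsplit]
          rcases List.mem_map.mp hrrest with ⟨z, hz, hzr⟩
          exact List.mem_map.mpr ⟨z, (List.dropWhile_sublist _).mem hz, hzr⟩
        · rw [if_neg hrrest, PySem.Dict.getD_insert, if_neg hr, if_neg]
          intro hmem
          rcases List.mem_map.mp hmem with ⟨z, hz, hzr⟩
          rcases (List.mem_append.mp ((List.takeWhile_append_dropWhile (p := fun q : Int × String × String => q.2.2 == p.2.2) (l := p :: t)) ▸ hz)) with h | h
          · have := List.mem_takeWhile_imp (p := fun q : Int × String × String => q.2.2 == p.2.2) h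
            exact hr (hzr ▸ (by simpa using this))
          · exact hrrest (List.mem_map.mpr ⟨z, h, hzr⟩)

-- ===== VERDICT (by name: the statement is the Claim_ definition above) =====
theorem regions_from_sites_spec : Claim_equal_regions_from_sites := by
  intro l _
  unfold Spec_regions_from_sites
  show (l.foldl rfsStep PySem.Dict.empty).items = _
  rw [PySem.Dict.items_eq_map_keys _ (rfsFold_nodup_keys l) ([] : List Int), rfsFold_keys]
  unfold regions_from_sites_alt
  refine List.map_congr_left fun r hr => ?_
  have hperm : (PySem.List.sorted l (fun p => p.2.2)).Perm l := PySem.List.sorted_perm l _ false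
  have hmem : r ∈ (PySem.List.sorted l (fun p => p.2.2)).map (fun p => p.2.2) := by
    rw [List.mem_map]
    rcases List.mem_map.mp ((PySem.Set.mem_ofList _ _).mp hr) with ⟨z, hz, hzr⟩
    exact ⟨z, hperm.mem_iff.mpr hz, hzr⟩
  rw [rfsFold_getD,
    rfsGroup_getD_aux (PySem.List.sorted l (fun p => p.2.2)).length _ le_rfl _ _
      (PySem.List.sorted_pairwise l _),
    if_pos hmem, rfs_filter_sorted]
  simp
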